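-- pv_equiv track=rewrite | github.com/dmellonikita09/my_leetcode_practice_solutions | vscode_problem_solutions/largestVal.py | largestVal
-- ===== SOURCE A (Python) =====
-- def largestVal(arr):
--     val = set()
--     ar = []
--     for i in arr:
--         if abs(i) in val:
--             ar.append(abs(i))
--         else:
--             val.add(abs(i))
--     ar.sort()
--     return max(ar)
-- ===== SOURCE B (Python) =====
-- def largestVal(arr):
--     # Sort the absolute values in descending order; the answer is the value of
--     # the first adjacent equal pair (duplicates are contiguous after sorting,
--     # and the descending order makes the first pair found the largest).
--     s = sorted((abs(i) for i in arr), reverse=True)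
--     for x, y in zip(s, s[1:]):
--         if x == y:
--             return x
--     raise ValueError("no repeated absolute value")
-- ===== Notes on version B (the rewrite author's own statement) =====
-- stated objective: alternative
-- what changed: Replaced the hash-set membership pass that collects duplicates (then sorts them and takes max) with sort-then-scan: sort all absolute values in descending order and return the value of the first adjacent equal pair; no set and no duplicate list exist.
import Mathlib
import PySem

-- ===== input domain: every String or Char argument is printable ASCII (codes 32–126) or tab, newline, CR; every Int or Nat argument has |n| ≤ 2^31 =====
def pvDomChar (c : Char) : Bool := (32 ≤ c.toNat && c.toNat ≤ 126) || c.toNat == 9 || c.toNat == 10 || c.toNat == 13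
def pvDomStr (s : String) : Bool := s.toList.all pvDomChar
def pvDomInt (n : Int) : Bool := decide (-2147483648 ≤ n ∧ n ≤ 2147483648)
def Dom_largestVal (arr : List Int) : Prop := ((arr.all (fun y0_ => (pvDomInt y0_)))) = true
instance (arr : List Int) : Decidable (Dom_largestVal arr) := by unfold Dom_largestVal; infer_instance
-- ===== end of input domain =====

-- B replaces A's seen-set + duplicate list + sort with sort-all-descending then scan for the first adjacent equal pair (alternative algorithm, same O(n log n) cost).


-- ===== PORT A =====
def largestVal (arr : List Int) : Int :=
  let st := arr.foldl (fun (s : PySem.Set Int × List Int) i =>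
    if PySem.Set.contains s.1 |i| then (s.1, s.2 ++ [|i|])
    else (PySem.Set.add s.1 |i|, s.2)) (PySem.Set.empty, [])
  let ar := PySem.List.sorted st.2 (fun x => x) false
  -- max(ar): Python raises ValueError on empty ar; Pre_ excludes that, getD 0 is a dummy
  (PySem.List.max? ar (fun x => x)).getD 0

-- ===== PORT B =====
-- the for-loop over zip(s, s[1:]): return the first element equal to its successor
def pvFirstAdj : List Int → Option Int
  | a :: b :: t => if a = b then some a else pvFirstAdj (b :: t)
  | _ => none

def largestVal_alt (arr : List Int) : Int :=
  let s := PySem.List.sorted (arr.map (fun i => |i|)) (fun x => x) true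
  -- the raise on a scan with no equal pair: none; Pre_ excludes that, getD 0 is a dummy
  (pvFirstAdj s).getD 0

-- ===== PRECONDITION & SPEC =====
-- Pre_ excludes exactly the inputs with no repeated absolute value, where Python raises ValueError in A (max of an empty list) and in B (explicit raise) alike.
def Pre_largestVal (arr : List Int) : Prop := ¬ (arr.map (fun i => |i|)).Nodup
instance (arr : List Int) : Decidable (Pre_largestVal arr) := by unfold Pre_largestVal; infer_instance
def pvWitness_largestVal : List Int := [3, -3, 1]
def Spec_largestVal (arr : List Int) (out : Int) : Prop := out = largestVal_alt arr
instance (arr : List Int) (out : Int) : Decidable (Spec_largestVal arr out) := by unfold Spec_largestVal; infer_instance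

-- ===== CLAIM (what is proved, stated in full; the proofs are below) =====
def Claim_equal_largestVal : Prop := ∀ (arr : List Int), Dom_largestVal arr → Pre_largestVal arr → Spec_largestVal arr (largestVal arr)

-- ===== LEMMAS AND PROOFS =====

theorem foldA_count (m : List Int) (x : Int) :
    ∀ (S : PySem.Set Int) (ar : List Int),
    (m.foldl (fun (s : PySem.Set Int × List Int) a =>
        if PySem.Set.contains s.1 a then (s.1, s.2 ++ [a]) else (PySem.Set.add s.1 a, s.2)) (S, ar)).2.count x
      + (if x ∈ ((m.foldl (fun (s : PySem.Set Int × List Int) a =>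
        if PySem.Set.contains s.1 a then (s.1, s.2 ++ [a]) else (PySem.Set.add s.1 a, s.2)) (S, ar)).1 : List Int) then 1 else 0)
      = ar.count x + (if x ∈ (S : List Int) then 1 else 0) + m.count x := by
  induction m with
  | nil => intro S ar; simp
  | cons a t ih =>
    intro S ar
    simp only [List.foldl_cons, List.count_cons]
    by_cases h : PySem.Set.contains S a = true
    · rw [if_pos h]
      rw [ih S (ar ++ [a])]
      have hmem : a ∈ (S : List Int) := by simpa [PySem.Set.contains] using h
      by_cases hx : x = a
      · subst hx; simp [hmem]; omega
      · simp [List.count_append, Ne.symm hx]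
    · rw [if_neg h]
      rw [ih (PySem.Set.add S a) ar]
      have hnmem : a ∉ (S : List Int) := by simpa [PySem.Set.contains] using h
      by_cases hx : x = a
      · subst hx; simp [hnmem]; omega
      · simp [PySem.Set.mem_add, hx, Ne.symm hx]

-- an element of the duplicates list has been recorded in the seen-set
theorem foldA_sub (m : List Int) (x : Int) :
    ∀ (S : PySem.Set Int) (ar : List Int), (x ∈ ar → x ∈ (S : List Int)) →
    x ∈ (m.foldl (fun (s : PySem.Set Int × List Int) a =>
        if PySem.Set.contains s.1 a then (s.1, s.2 ++ [a]) else (PySem.Set.add s.1 a, s.2)) (S, ar)).2 →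
    x ∈ ((m.foldl (fun (s : PySem.Set Int × List Int) a =>
        if PySem.Set.contains s.1 a then (s.1, s.2 ++ [a]) else (PySem.Set.add s.1 a, s.2)) (S, ar)).1 : List Int) := by
  induction m with
  | nil => intro S ar hsub hx; exact hsub hx
  | cons a t ih =>
    intro S ar hsub
    simp only [List.foldl_cons]
    by_cases h : PySem.Set.contains S a = true
    · rw [if_pos h]
      refine ih S (ar ++ [a]) ?_
      intro hx
      rcases List.mem_append.mp hx with hx | hx
      · exact hsub hx
      · simp at hx; subst hx; simpa [PySem.Set.contains] using h
    · rw [if_neg h]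
      refine ih (PySem.Set.add S a) ar ?_
      intro hx
      exact (PySem.Set.mem_add _ _ _).mpr (Or.inl (hsub hx))

theorem foldA_mem (m : List Int) (x : Int) :
    (x ∈ (m.foldl (fun (s : PySem.Set Int × List Int) a =>
        if PySem.Set.contains s.1 a then (s.1, s.2 ++ [a]) else (PySem.Set.add s.1 a, s.2))
        ((PySem.Set.empty : PySem.Set Int), ([] : List Int))).2) ↔ 2 ≤ m.count x := by
  have h := foldA_count m x PySem.Set.empty []
  set F := m.foldl (fun (s : PySem.Set Int × List Int) a =>
      if PySem.Set.contains s.1 a then (s.1, s.2 ++ [a]) else (PySem.Set.add s.1 a, s.2))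
      ((PySem.Set.empty : PySem.Set Int), ([] : List Int)) with hF
  simp only [PySem.Set.empty, List.count_nil, List.not_mem_nil, if_false, zero_add] at h
  constructor
  · intro hx
    have h1 : 0 < F.2.count x := List.count_pos_iff.mpr hx
    have hb : x ∈ (F.1 : List Int) := by
      rw [hF]; exact foldA_sub m x _ _ (by simp [PySem.Set.empty]) (hF ▸ hx)
    rw [if_pos hb] at h
    omega
  · intro h2
    rw [← List.count_pos_iff]
    by_cases hb : x ∈ (F.1 : List Int)
    · rw [if_pos hb] at h; omega
    · rw [if_neg hb] at h; omega

-- on a nonincreasing list with a duplicate, the scan finds the largest duplicated value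
theorem firstAdj_spec (s : List Int) (hs : s.Pairwise (fun a b => b ≤ a)) (hd : ¬ s.Nodup) :
    ∃ x, pvFirstAdj s = some x ∧ 2 ≤ s.count x ∧ ∀ v, 2 ≤ s.count v → v ≤ x := by
  induction s with
  | nil => simp at hd
  | cons a t ih =>
    cases t with
    | nil => simp at hd
    | cons b u =>
      by_cases hab : a = b
      · subst hab
        refine ⟨a, by simp [pvFirstAdj], ?_, ?_⟩
        · simp
        · intro v hv
          by_cases hva : v = a
          · omega
          · have hvm : v ∈ u := by
              have : 2 ≤ (a :: a :: u).count v := hv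
              simp [Ne.symm hva] at this
              exact List.count_pos_iff.mp (by omega)
            have := (List.pairwise_cons.mp hs).1 v (by simp [hvm])
            exact this
      · have hna : a ∉ b :: u := by
          intro hmem
          have hle := (List.pairwise_cons.mp hs).1 a hmem
          have hbs : b ≤ a := (List.pairwise_cons.mp hs).1 b (by simp)
          -- a ≤ b from? need strict: a ∈ b::u gives a ≤ b only if further order; do case split
          rcases List.mem_cons.mp hmem with h | h
          · exact hab h
          · -- a ∈ u : b ≥ a from pairwise of tail
            have ht := (List.pairwise_cons.mp hs).2
            have : a ≤ b := (List.pairwise_cons.mp ht).1 a h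
            have : a = b := le_antisymm this hbs
            exact hab this
        have hdt : ¬ (b :: u).Nodup := by
          intro hnd
          exact hd (List.nodup_cons.mpr ⟨hna, hnd⟩)
        obtain ⟨x, hfa, hcx, hmax⟩ := ih (List.pairwise_cons.mp hs).2 hdt
        refine ⟨x, by simpa [pvFirstAdj, hab] using hfa, ?_, ?_⟩
        · have hxa : x ≠ a := by
            intro h; subst h
            exact hna (List.count_pos_iff.mp (by omega))
          simpa [List.count_cons, Ne.symm hxa] using hcx
        · intro v hv
          by_cases hva : v = a
          · subst hva
            have : (b :: u).count v = 0 := by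
              by_contra h
              exact hna (List.count_pos_iff.mp (by omega))
            simp [this] at hv
          · apply hmax
            simpa [List.count_cons, Ne.symm hva] using hv

-- ===== VERDICT (by name: the statement is the Claim_ definition above) =====
theorem largestVal_spec : Claim_equal_largestVal := by
  intro arr _ hpre
  unfold Spec_largestVal largestVal largestVal_alt
  set m : List Int := arr.map (fun i => |i|) with hm
  have hpre' : ¬ m.Nodup := hpre
  -- B side: sorted m descending
  set s : List Int := PySem.List.sorted m (fun x => x) true with hsdef
  have hperm : s.Perm m := PySem.List.sorted_perm m (fun x => x) true
  have hpw : s.Pairwise (fun a b => b ≤ a) := by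
    have := PySem.List.sorted_pairwise_rev m (fun x => x)
    simpa using this
  have hsnd : ¬ s.Nodup := fun h => hpre' (hperm.nodup_iff.mp h)
  obtain ⟨x, hfa, hcx, hmax⟩ := firstAdj_spec s hpw hsnd
  -- counts of s = counts of m
  have hcnt : ∀ v, s.count v = m.count v := fun v => hperm.count_eq v
  -- A side: fold over arr with |·| is fold over m
  have hA : ∀ (st : PySem.Set Int × List Int),
      arr.foldl (fun (st : PySem.Set Int × List Int) i =>
        if PySem.Set.contains st.1 |i| then (st.1, st.2 ++ [|i|]) else (PySem.Set.add st.1 |i|, st.2)) st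
      = m.foldl (fun (st : PySem.Set Int × List Int) a =>
        if PySem.Set.contains st.1 a then (st.1, st.2 ++ [a]) else (PySem.Set.add st.1 a, st.2)) st := by
    intro st; rw [hm, List.foldl_map]
  rw [hA]
  set D := PySem.List.sorted
      (m.foldl (fun (st : PySem.Set Int × List Int) a =>
        if PySem.Set.contains st.1 a then (st.1, st.2 ++ [a]) else (PySem.Set.add st.1 a, st.2))
        ((PySem.Set.empty : PySem.Set Int), ([] : List Int))).2 (fun x => x) false with hD
  have hmemD : ∀ v, v ∈ D ↔ 2 ≤ m.count v := by
    intro v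
    rw [hD, (PySem.List.sorted_perm _ _ _).mem_iff]
    exact foldA_mem m v
  -- x is in D
  have hxD : x ∈ D := (hmemD x).mpr (by rw [← hcnt]; exact hcx)
  show (PySem.List.max? D (fun x => x)).getD 0 = (pvFirstAdj s).getD 0
  cases hMx : PySem.List.max? D (fun x => x) with
  | none =>
    have : D = [] := (PySem.List.max?_eq_none_iff _ _).mp hMx
    rw [this] at hxD; simp at hxD
  | some M =>
    have hMD : M ∈ D := PySem.List.max?_mem hMx
    have hMx2 : M ≤ x := hmax M (by rw [hcnt]; exact (hmemD M).mp hMD)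
    have hxM : x ≤ M := PySem.List.max?_isMax hMx x hxD
    have : M = x := le_antisymm hMx2 hxM
    rw [hfa, this]
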